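-- pv_equiv track=rewrite | github.com/GXVJS/Practics | PR7/main.py | is_composed_of_digits
-- ===== SOURCE A (Python) =====
-- def is_composed_of_digits(num, a, b, c):
--     """Проверяет, состоит ли число только из цифр a, b, c"""
--     digits = {a, b, c}
--     original_num = num
--
--     if num == 0 and 0 in digits:
--         return True
--
--     while num > 0:
--         digit = num % 10
--         if digit not in digits:
--             return False
--         num //= 10
--     return True
-- ===== SOURCE B (Python) =====
-- def is_composed_of_digits(num, a, b, c):
--     """String-domain check: compare num's decimal representation character-wise
--     against the string forms of a, b, c (no arithmetic digit extraction)."""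
--     if num <= 0:
--         return True
--     return set(str(num)) <= {str(a), str(b), str(c)}
-- ===== Notes on version B (the rewrite author's own statement) =====
-- stated objective: alternative
-- what changed: B decides in the string domain: for positive num it compares the character set of str(num) against {str(a), str(b), str(c)}, replacing A's arithmetic %10/ //10 digit-extraction loop and its special-cased num==0 branch entirely.
import Mathlib
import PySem

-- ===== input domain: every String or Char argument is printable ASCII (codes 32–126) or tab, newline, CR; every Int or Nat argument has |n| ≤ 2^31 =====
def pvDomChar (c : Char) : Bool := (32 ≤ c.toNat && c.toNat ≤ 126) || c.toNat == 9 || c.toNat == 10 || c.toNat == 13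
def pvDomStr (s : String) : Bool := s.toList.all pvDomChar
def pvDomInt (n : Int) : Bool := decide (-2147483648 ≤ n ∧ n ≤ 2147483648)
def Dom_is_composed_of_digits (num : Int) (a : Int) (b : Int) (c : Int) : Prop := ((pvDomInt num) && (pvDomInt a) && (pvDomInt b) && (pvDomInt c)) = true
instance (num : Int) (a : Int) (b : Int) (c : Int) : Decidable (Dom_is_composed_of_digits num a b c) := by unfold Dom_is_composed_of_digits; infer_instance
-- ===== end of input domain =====

-- B works in the string domain: it compares the characters of str(num) with the string
-- forms of a, b, c, instead of A's arithmetic %10 // 10 digit-extraction loop (alternative decomposition, same cost).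

-- ===== PORT A =====
-- the 'while num > 0' loop of A: early return False on a digit outside {a,b,c}
def pvALoop (num a b c : Int) : Bool :=
  if _h : 0 < num then
    let digit := PySem.Int.mod num 10
    if ¬ (digit = a ∨ digit = b ∨ digit = c) then false
    else pvALoop (PySem.Int.floordiv num 10) a b c
  else true
termination_by num.toNat
decreasing_by
  rw [PySem.Int.floordiv_eq_ediv_of_pos (by omega : (0:Int) < 10)]
  omega

def is_composed_of_digits (num : Int) (a : Int) (b : Int) (c : Int) : Bool :=
  -- digits = {a, b, c}; membership in it is the disjunction of equalities (exact as a set)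
  if num = 0 ∧ (0 = a ∨ 0 = b ∨ 0 = c) then true
  else pvALoop num a b c

-- ===== PORT B =====
def is_composed_of_digits_alt (num : Int) (a : Int) (b : Int) (c : Int) : Bool :=
  if num ≤ 0 then true
  else
    -- set(str(num)) <= {str(a), str(b), str(c)}: iterating a Python str yields 1-char strings
    PySem.Set.issubset
      (PySem.Set.ofList ((PySem.Int.toStr num).toList.map (fun ch => String.ofList [ch])))
      (PySem.Set.ofList [PySem.Int.toStr a, PySem.Int.toStr b, PySem.Int.toStr c])

-- ===== PRECONDITION & SPEC =====
def Spec_is_composed_of_digits (num : Int) (a : Int) (b : Int) (c : Int) (out : Bool) : Prop := out = is_composed_of_digits_alt num a b c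
instance (num : Int) (a : Int) (b : Int) (c : Int) (out : Bool) : Decidable (Spec_is_composed_of_digits num a b c out) := by unfold Spec_is_composed_of_digits; infer_instance

-- ===== CLAIM (what is proved, stated in full; the proofs are below) =====
def Claim_equal_is_composed_of_digits : Prop := ∀ (num : Int) (a : Int) (b : Int) (c : Int), Dom_is_composed_of_digits num a b c → Spec_is_composed_of_digits num a b c (is_composed_of_digits num a b c)

-- ===== LEMMAS AND PROOFS =====

-- structural version of Nat.toDigitsCore's fuel recursion (base 10)
def pvDigits (n : Nat) : List Char :=
  let d := Nat.digitChar (n % 10)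
  if _h : n / 10 = 0 then [d] else pvDigits (n / 10) ++ [d]
termination_by n
decreasing_by exact Nat.div_lt_self (by omega) (by omega)

lemma pv_core_eq : ∀ (f n : Nat), n < f → ∀ (ds : List Char),
    Nat.toDigitsCore 10 f n ds = pvDigits n ++ ds := by
  intro f
  induction f with
  | zero => omega
  | succ f ih =>
    intro n hn ds
    rw [Nat.toDigitsCore, pvDigits]
    by_cases h : n / 10 = 0
    · simp [h]
    · have hpos : 0 < n := by omega
      have : n / 10 < f := by
        have := Nat.div_lt_self hpos (by omega : 1 < 10)
        omega
      simp only [h]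
      rw [ih _ this]
      simp

lemma pv_toDigits_eq (n : Nat) : Nat.toDigits 10 n = pvDigits n := by
  rw [Nat.toDigits, pv_core_eq (n + 1) n (by omega), List.append_nil]

lemma pvDigits_ne_nil (n : Nat) : pvDigits n ≠ [] := by
  rw [pvDigits]
  split_ifs <;> simp

lemma pv_digitChar_inj (d e : Nat) (hd : d < 10) (he : e < 10)
    (h : Nat.digitChar d = Nat.digitChar e) : d = e := by
  interval_cases d <;> interval_cases e <;> simp_all [Nat.digitChar]

lemma pv_digitChar_ne_neg (d : Nat) (hd : d < 10) : Nat.digitChar d ≠ '-' := by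
  interval_cases d <;> simp [Nat.digitChar]

-- the single character of a digit d < 10 equals str(x) exactly when x = d
lemma pv_single_eq_toStr (d : Nat) (hd : d < 10) (x : Int) :
    String.ofList [Nat.digitChar d] = PySem.Int.toStr x ↔ (d : Int) = x := by
  constructor
  · intro h
    have hl : [Nat.digitChar d] = (PySem.Int.toStr x).toList := by
      rw [← h]; simp
    rw [PySem.Int.toStr] at hl
    simp only [PySem.Int.toChars] at hl
    by_cases hx : x < 0
    · rw [if_pos hx] at hl
      simp at hl
      exact absurd hl.1 (pv_digitChar_ne_neg d hd)
    · rw [if_neg hx] at hl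
      simp at hl
      rw [pv_toDigits_eq] at hl
      by_cases hbig : x.toNat / 10 = 0
      · rw [pvDigits, dif_pos hbig] at hl
        simp at hl
        have : d = x.toNat % 10 := pv_digitChar_inj _ _ hd (Nat.mod_lt _ (by omega)) hl
        have hx10 : x.toNat < 10 := by omega
        have : d = x.toNat := by omega
        omega
      · rw [pvDigits, dif_neg hbig] at hl
        have := pvDigits_ne_nil (x.toNat / 10)
        cases hpd : pvDigits (x.toNat / 10) with
        | nil => exact absurd hpd this
        | cons y ys => rw [hpd] at hl; simp at hl
  · intro h
    rw [← h, PySem.Int.toStr]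
    simp only [PySem.Int.toChars]
    rw [if_neg (by omega : ¬ (d : Int) < 0)]
    have : ((d : Int)).toNat = d := by omega
    rw [this, pv_toDigits_eq, pvDigits, dif_pos (by omega : d / 10 = 0),
        Nat.mod_eq_of_lt hd]

-- A's loop, characterised pointwise over pvDigits
lemma pv_loop_eq (m : Nat) (hmpos : 0 < m) (a b c : Int) :
    pvALoop (m : Int) a b c
      = decide (∀ ch ∈ pvDigits m,
          String.ofList [ch] = PySem.Int.toStr a ∨ String.ofList [ch] = PySem.Int.toStr b ∨
            String.ofList [ch] = PySem.Int.toStr c) := by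
  induction m using Nat.strong_induction_on with
  | _ m ih =>
    rw [pvALoop, pvDigits]
    have hpos : (0:Int) < (m:Int) := by exact_mod_cast hmpos
    have hmod : PySem.Int.mod (m : Int) 10 = ((m % 10 : Nat) : Int) := by
      rw [PySem.Int.mod, Int.fmod_eq_emod]; omega
    have hdiv : PySem.Int.floordiv (m : Int) 10 = ((m / 10 : Nat) : Int) := by
      rw [PySem.Int.floordiv_eq_ediv_of_pos (by omega : (0:Int) < 10)]; omega
    simp only [dif_pos hpos, hmod, hdiv]
    have hsingle := pv_single_eq_toStr (m % 10) (Nat.mod_lt m (by omega))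
    by_cases hmem : ((m % 10 : Nat) : Int) = a ∨ ((m % 10 : Nat) : Int) = b ∨ ((m % 10 : Nat) : Int) = c
    · rw [if_neg (not_not_intro hmem)]
      by_cases h10 : m / 10 = 0
      · rw [dif_pos h10, h10]
        rw [pvALoop]
        rw [Bool.eq_iff_iff]
        simp [hsingle]
        push_cast at hmem
        tauto
      · rw [dif_neg h10]
        have hlt : m / 10 < m := Nat.div_lt_self hmpos (by omega : 1 < 10)
        rw [ih (m / 10) hlt (by omega)]
        rw [Bool.eq_iff_iff]
        simp only [decide_eq_true_eq, List.mem_append, List.mem_singleton]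
        constructor
        · rintro h2 ch (hch | rfl)
          · exact h2 ch hch
          · simp only [hsingle]; exact hmem
        · intro h ch hch
          exact h ch (Or.inl hch)
    · rw [if_pos hmem]
      rw [Bool.eq_iff_iff]
      simp only [Bool.false_eq_true, false_iff, decide_eq_true_eq, not_forall]
      by_cases h10 : m / 10 = 0
      · rw [dif_pos h10]
        exact ⟨Nat.digitChar (m % 10), by simp, by simpa [hsingle] using hmem⟩
      · rw [dif_neg h10]
        exact ⟨Nat.digitChar (m % 10), by simp, by simpa [hsingle] using hmem⟩

-- ===== VERDICT (by name: the statement is the Claim_ definition above) =====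
theorem is_composed_of_digits_spec : Claim_equal_is_composed_of_digits := by
  intro num a b c _hd
  unfold Spec_is_composed_of_digits is_composed_of_digits is_composed_of_digits_alt
  by_cases hle : num ≤ 0
  · rw [if_pos hle]
    split_ifs with h
    · rfl
    · rw [pvALoop]; simp; omega
  · rw [if_neg hle, if_neg (by omega : ¬ (num = 0 ∧ (0 = a ∨ 0 = b ∨ 0 = c)))]
    have hcast : ((num.toNat : Nat) : Int) = num := by omega
    have hkey := pv_loop_eq num.toNat (by omega) a b c
    rw [hcast] at hkey
    rw [hkey]
    have hchars : (PySem.Int.toStr num).toList = pvDigits num.toNat := by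
      rw [PySem.Int.toStr]
      simp only [PySem.Int.toChars, if_neg (by omega : ¬ num < 0)]
      simp [pv_toDigits_eq]
    rw [Bool.eq_iff_iff, PySem.Set.issubset_iff]
    simp only [hchars, PySem.Set.mem_ofList, List.mem_map, decide_eq_true_eq,
      List.mem_cons, List.not_mem_nil, or_false]
    constructor
    · rintro h x ⟨ch, hch, rfl⟩
      exact h ch hch
    · intro h ch hch
      exact h _ ⟨ch, hch, rfl⟩
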